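-- pv_equiv track=rewrite | github.com/kaikaichumi/OpenKuro | src/adapters/utils.py | _split_by_single_lines
-- ===== SOURCE A (Python) =====
-- def _split_by_single_lines(text: str, max_len: int) -> list[str]:
--     """Split text by single newlines → words → characters."""
--     chunks: list[str] = []
--     lines = text.split("\n")
--     current = ""
--     for line in lines:
--         candidate = (current + "\n" + line) if current else line
--         if len(candidate) <= max_len:
--             current = candidate
--         else:
--             if current:
--                 chunks.append(current)
--             if len(line) > max_len:
--                 # Split by words
--                 words = line.split(" ")
--                 current = ""
--                 for word in words:
--                     candidate = (current + " " + word) if current else word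
--                     if len(candidate) <= max_len:
--                         current = candidate
--                     else:
--                         if current:
--                             chunks.append(current)
--                         if len(word) > max_len:
--                             # Hard split
--                             for i in range(0, len(word), max_len):
--                                 chunks.append(word[i:i + max_len])
--                             current = ""
--                         else:
--                             current = word
--                 if current:
--                     chunks.append(current)
--                     current = ""
--             else:
--                 current = line
--     if current:
--         chunks.append(current)
--     return chunks
-- ===== SOURCE B (Python) =====
-- def _split_by_single_lines(text: str, max_len: int) -> list[str]:
--     """Split text by single newlines -> words -> characters (recursive greedy packer)."""
--     return _pack(text, max_len, ["\n", " "])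
--
--
-- def _pack(text: str, max_len: int, seps: list[str]) -> list[str]:
--     if not seps:
--         return [text[i:i + max_len] for i in range(0, len(text), max_len)]
--     sep = seps[0]
--     chunks: list[str] = []
--     current = ""
--     for piece in text.split(sep):
--         candidate = (current + sep + piece) if current else piece
--         if len(candidate) <= max_len:
--             current = candidate
--         else:
--             if current:
--                 chunks.append(current)
--             if len(piece) > max_len:
--                 chunks.extend(_pack(piece, max_len, seps[1:]))
--                 current = ""
--             else:
--                 current = piece
--     if current:
--         chunks.append(current)
--     return chunks
-- ===== Notes on version B (the rewrite author's own statement) =====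
-- stated objective: alternative
-- what changed: Replaces A's three hand-inlined nested loops (lines, then words, then character slicing) by one recursive greedy packer pack(text, max_len, seps) that splits on the head separator, packs pieces greedily, and recurses with the remaining separators for over-long pieces, with the hard character split as the base case.
import Mathlib
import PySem

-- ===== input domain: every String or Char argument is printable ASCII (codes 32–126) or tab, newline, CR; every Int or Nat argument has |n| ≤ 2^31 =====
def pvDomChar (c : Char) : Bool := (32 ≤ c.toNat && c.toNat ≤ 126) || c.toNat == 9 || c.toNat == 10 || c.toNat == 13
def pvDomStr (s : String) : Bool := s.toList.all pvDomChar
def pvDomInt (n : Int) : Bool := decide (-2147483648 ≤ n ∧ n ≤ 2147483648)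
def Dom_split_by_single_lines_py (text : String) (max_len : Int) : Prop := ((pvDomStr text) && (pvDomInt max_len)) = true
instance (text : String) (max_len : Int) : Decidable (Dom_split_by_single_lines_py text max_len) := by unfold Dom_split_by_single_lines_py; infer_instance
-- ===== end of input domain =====

-- B replaces A's three hand-inlined nested loops by one recursive greedy packer over a
-- list of separators (objective: alternative decomposition, same asymptotic cost).

-- ===== PORT A =====
-- the innermost 'for i in range(0, len(word), max_len): chunks.append(word[i:i+max_len])'
def pvHardA (max_len : Int) (word : List Char) (chunks : List (List Char)) : List (List Char) :=
  (PySem.List.pyRange 0 (word.length : Int) max_len).foldl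
    (fun ch i => ch ++ [PySem.List.slice word (some i) (some (i + max_len))]) chunks

-- the body of 'for word in words: …'
def pvWordStepA (max_len : Int) (st : List (List Char) × List Char) (word : List Char) :
    List (List Char) × List Char :=
  let candidate := if st.2.isEmpty then word else st.2 ++ [' '] ++ word
  if (candidate.length : Int) ≤ max_len then (st.1, candidate)
  else
    let chunks1 := if st.2.isEmpty then st.1 else st.1 ++ [st.2]
    if (word.length : Int) > max_len then (pvHardA max_len word chunks1, [])
    else (chunks1, word)

-- the body of 'for line in lines: …'
def pvLineStepA (max_len : Int) (st : List (List Char) × List Char) (line : List Char) :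
    List (List Char) × List Char :=
  let candidate := if st.2.isEmpty then line else st.2 ++ ['\n'] ++ line
  if (candidate.length : Int) ≤ max_len then (st.1, candidate)
  else
    let chunks1 := if st.2.isEmpty then st.1 else st.1 ++ [st.2]
    if (line.length : Int) > max_len then
      let st2 := (PySem.Chars.splitOn line [' ']).foldl (pvWordStepA max_len) (chunks1, [])
      (if st2.2.isEmpty then st2.1 else st2.1 ++ [st2.2], [])
    else (chunks1, line)

def split_by_single_lines_py (text : String) (max_len : Int) : List String :=
  let st := (PySem.Chars.splitOn text.toList ['\n']).foldl (pvLineStepA max_len) ([], [])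
  (if st.2.isEmpty then st.1 else st.1 ++ [st.2]).map String.ofList

-- ===== PORT B =====
-- Source B's _pack: base case = the hard character split; otherwise split on the head
-- separator, pack greedily, recurse with the remaining separators for over-long pieces.
def pvPack (max_len : Int) : List (List Char) → List Char → List (List Char)
  | [], text =>
      (PySem.List.pyRange 0 (text.length : Int) max_len).map
        (fun i => PySem.List.slice text (some i) (some (i + max_len)))
  | sep :: rest, text =>
      let st := (PySem.Chars.splitOn text sep).foldl
        (fun (st : List (List Char) × List Char) piece =>
          let candidate := if st.2.isEmpty then piece else st.2 ++ sep ++ piece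
          if (candidate.length : Int) ≤ max_len then (st.1, candidate)
          else
            let chunks1 := if st.2.isEmpty then st.1 else st.1 ++ [st.2]
            if (piece.length : Int) > max_len then (chunks1 ++ pvPack max_len rest piece, [])
            else (chunks1, piece)) ([], [])
      if st.2.isEmpty then st.1 else st.1 ++ [st.2]

def split_by_single_lines_py_alt (text : String) (max_len : Int) : List String :=
  (pvPack max_len [['\n'], [' ']] text.toList).map String.ofList

-- ===== PRECONDITION & SPEC =====
-- Pre_ excludes exactly the inputs where Python A raises (ValueError from range(0, len, 0)):
-- max_len = 0 together with some character other than '\n' and ' ' in text.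
def Pre_split_by_single_lines_py (text : String) (max_len : Int) : Prop :=
  max_len = 0 → text.toList.all (fun c => c == '\n' || c == ' ') = true
instance (text : String) (max_len : Int) : Decidable (Pre_split_by_single_lines_py text max_len) := by
  unfold Pre_split_by_single_lines_py; infer_instance

def pvWitness_split_by_single_lines_py : String × Int := ("hello wonderful\nworld", 7)

def Spec_split_by_single_lines_py (text : String) (max_len : Int) (out : List String) : Prop :=
  out = split_by_single_lines_py_alt text max_len
instance (text : String) (max_len : Int) (out : List String) :
    Decidable (Spec_split_by_single_lines_py text max_len out) := by
  unfold Spec_split_by_single_lines_py; infer_instance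

-- ===== CLAIM (what is proved, stated in full; the proofs are below) =====
def Claim_equal_split_by_single_lines_py : Prop :=
  ∀ (text : String) (max_len : Int), Dom_split_by_single_lines_py text max_len →
    Pre_split_by_single_lines_py text max_len →
    Spec_split_by_single_lines_py text max_len (split_by_single_lines_py text max_len)

-- ===== LEMMAS AND PROOFS =====

-- A's hard-split loop is B's base case appended to the accumulated chunks.
lemma pvHardA_eq (ml : Int) (w : List Char) (chunks : List (List Char)) :
    pvHardA ml w chunks = chunks ++ pvPack ml [] w := by
  unfold pvHardA
  rw [PySem.List.foldl_append_singleton_eq_map]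
  simp [pvPack]

-- factoring a prefix of the chunk accumulator out of a fold
lemma pvFoldFactor {β γ : Type} (step : List (List Char) × β → γ → List (List Char) × β)
    (h : ∀ c st w, step (c ++ st.1, st.2) w = (c ++ (step st w).1, (step st w).2)) :
    ∀ (l : List γ) (c : List (List Char)) (st : List (List Char) × β),
      l.foldl step (c ++ st.1, st.2) = (c ++ (l.foldl step st).1, (l.foldl step st).2) := by
  intro l
  induction l with
  | nil => intro c st; rfl
  | cons w tl ih =>
      intro c st
      simp only [List.foldl_cons, h c st w]
      exact ih c (step st w)

lemma pvWordStepA_factor (ml : Int) :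
    ∀ (c : List (List Char)) (st : List (List Char) × List Char) (w : List Char),
      pvWordStepA ml (c ++ st.1, st.2) w = (c ++ (pvWordStepA ml st w).1, (pvWordStepA ml st w).2) := by
  intro c st w
  simp only [pvWordStepA, pvHardA_eq]
  split_ifs <;> simp [List.append_assoc]

-- A's word step IS B's pack step for separator ' ' with the hard split as recursion.
lemma pvWordStepA_eq_packStep (ml : Int) (st : List (List Char) × List Char) (w : List Char) :
    pvWordStepA ml st w =
      (let candidate := if st.2.isEmpty then w else st.2 ++ [' '] ++ w
       if (candidate.length : Int) ≤ ml then (st.1, candidate)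
       else
         let chunks1 := if st.2.isEmpty then st.1 else st.1 ++ [st.2]
         if (w.length : Int) > ml then (chunks1 ++ pvPack ml [] w, [])
         else (chunks1, w)) := by
  simp only [pvWordStepA, pvHardA_eq]

-- A's whole word loop (with its trailing flush) is pack with seps = [" "].
lemma pvWordLoopA_eq (ml : Int) (line : List Char) (chunks1 : List (List Char)) :
    (let st2 := (PySem.Chars.splitOn line [' ']).foldl (pvWordStepA ml) (chunks1, [])
     (if st2.2.isEmpty then st2.1 else st2.1 ++ [st2.2] : List (List Char))) =
      chunks1 ++ pvPack ml [[' ']] line := by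
  have hstep : (pvWordStepA ml) =
      (fun (st : List (List Char) × List Char) piece =>
        let candidate := if st.2.isEmpty then piece else st.2 ++ [' '] ++ piece
        if (candidate.length : Int) ≤ ml then (st.1, candidate)
        else
          let chunks1 := if st.2.isEmpty then st.1 else st.1 ++ [st.2]
          if (piece.length : Int) > ml then (chunks1 ++ pvPack ml [] piece, [])
          else (chunks1, piece)) := by
    funext st w; exact pvWordStepA_eq_packStep ml st w
  have hfac := pvFoldFactor (pvWordStepA ml) (pvWordStepA_factor ml)
      (PySem.Chars.splitOn line [' ']) chunks1 ([], [])
  simp only [List.append_nil] at hfac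
  simp only [hfac]
  rw [hstep]
  simp only [pvPack]
  split_ifs <;> simp [List.append_assoc]

-- A's line step IS B's pack step for separator '\n' with pack [" "] as recursion.
lemma pvLineStepA_eq (ml : Int) (st : List (List Char) × List Char) (line : List Char) :
    pvLineStepA ml st line =
      (let candidate := if st.2.isEmpty then line else st.2 ++ ['\n'] ++ line
       if (candidate.length : Int) ≤ ml then (st.1, candidate)
       else
         let chunks1 := if st.2.isEmpty then st.1 else st.1 ++ [st.2]
         if (line.length : Int) > ml then (chunks1 ++ pvPack ml [[' ']] line, [])
         else (chunks1, line)) := by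
  simp only [pvLineStepA, pvWordLoopA_eq]

lemma pvTop_eq (ml : Int) (cs : List Char) :
    (let st := (PySem.Chars.splitOn cs ['\n']).foldl (pvLineStepA ml) ([], [])
     (if st.2.isEmpty then st.1 else st.1 ++ [st.2] : List (List Char))) =
      pvPack ml [['\n'], [' ']] cs := by
  have hstep : (pvLineStepA ml) =
      (fun (st : List (List Char) × List Char) piece =>
        let candidate := if st.2.isEmpty then piece else st.2 ++ ['\n'] ++ piece
        if (candidate.length : Int) ≤ ml then (st.1, candidate)
        else
          let chunks1 := if st.2.isEmpty then st.1 else st.1 ++ [st.2]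
          if (piece.length : Int) > ml then (chunks1 ++ pvPack ml [[' ']] piece, [])
          else (chunks1, piece)) := by
    funext st w; exact pvLineStepA_eq ml st w
  rw [hstep]
  simp only [pvPack]

-- ===== VERDICT (by name: the statement is the Claim_ definition above) =====
theorem split_by_single_lines_py_spec : Claim_equal_split_by_single_lines_py := by
  intro text max_len _ _
  unfold Spec_split_by_single_lines_py
  unfold split_by_single_lines_py split_by_single_lines_py_alt
  exact congrArg (List.map String.ofList) (pvTop_eq max_len text.toList)
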